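-- pv_equiv track=rewrite | github.com/ariel-zilber/CyberBattleSimCloudEnvironemtGenerator | real/generate.py | _should_place_service_on_node
-- ===== SOURCE A (Python) =====
-- from typing import Dict, List, Any, Tuple, Optional, Set
-- from typing import Iterator, cast, Tuple,Dict
--
-- def _should_place_service_on_node(service: Dict, node_labels: Dict, subnet: str) -> bool:
--     """Determine service placement with improved heuristics."""
--     service_name = service.get('name', '').lower()
--     is_master = 'node-role.kubernetes.io/master' in node_labels or \
--                 'node-role.kubernetes.io/control-plane' in node_labels
--
--     # Master node services
--     master_services = ['api', 'controller', 'scheduler', 'etcd', 'coredns', 'kube-proxy']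
--     if any(term in service_name for term in master_services):
--         return is_master
--
--     # Database services
--     db_services = ['database', 'mysql', 'postgres', 'postgresql', 'mariadb', 'mongodb',
--                    'redis', 'cassandra', 'elasticsearch']
--     if any(term in service_name for term in db_services):
--         return 'database' in subnet.lower() or 'data' in subnet.lower()
--
--     # Frontend services
--     frontend_services = ['nginx', 'frontend', 'web', 'ui', 'portal', 'apache', 'httpd']
--     if any(term in service_name for term in frontend_services):
--         return 'frontend' in subnet.lower() or 'dmz' in subnet.lower()
--
--     # Backend/API services
--     backend_services = ['api', 'backend', 'service', 'app', 'application']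
--     if any(term in service_name for term in backend_services):
--         return 'backend' in subnet.lower() or 'application' in subnet.lower()
--
--     # Default placement for worker nodes
--     return not is_master
-- ===== SOURCE B (Python) =====
-- # B: different algorithm -- instead of testing each keyword against the name,
-- # enumerate the name's substrings (length-capped) and look them up in a
-- # keyword->priority hash map built once; the minimum matched priority picks
-- # the placement answer. The keyword-list scans of A disappear entirely.
--
-- _GROUPS = [
--     ['api', 'controller', 'scheduler', 'etcd', 'coredns', 'kube-proxy'],
--     ['database', 'mysql', 'postgres', 'postgresql', 'mariadb', 'mongodb',
--      'redis', 'cassandra', 'elasticsearch'],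
--     ['nginx', 'frontend', 'web', 'ui', 'portal', 'apache', 'httpd'],
--     ['api', 'backend', 'service', 'app', 'application'],
-- ]
-- _KW2PRI = {}
-- for _pri, _kws in enumerate(_GROUPS):
--     for _kw in _kws:
--         _KW2PRI.setdefault(_kw, _pri)
-- _MAXKW = max(len(_k) for _k in _KW2PRI)
--
--
-- def _best_priority(name):
--     """Minimum priority over all substrings of name that are keywords (4 = none)."""
--     best = 4
--     n = len(name)
--     for i in range(n + 1):
--         for j in range(i + 1, min(i + _MAXKW, n) + 1):
--             p = _KW2PRI.get(name[i:j])
--             if p is not None and p < best: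
--                 best = p
--     return best
--
--
-- def _should_place_service_on_node(service, node_labels, subnet):
--     name = service.get('name', '').lower()
--     is_master = ('node-role.kubernetes.io/master' in node_labels or
--                  'node-role.kubernetes.io/control-plane' in node_labels)
--     best = _best_priority(name)
--     sub = subnet.lower()
--     if best == 0:
--         return is_master
--     if best == 1:
--         return 'database' in sub or 'data' in sub
--     if best == 2:
--         return 'frontend' in sub or 'dmz' in sub
--     if best == 3:
--         return 'backend' in sub or 'application' in sub
--     return not is_master
-- ===== Notes on version B (the rewrite author's own statement) =====
-- stated objective: alternative
-- what changed: A scans four keyword lists testing each keyword with 'kw in name'; B inverts the traversal: it enumerates the (length-capped) substrings of the service name once, looks each up in a keyword->priority hash map built once at module level, and dispatches on the minimum matched priority (4 = no match = worker default).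
import Mathlib
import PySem

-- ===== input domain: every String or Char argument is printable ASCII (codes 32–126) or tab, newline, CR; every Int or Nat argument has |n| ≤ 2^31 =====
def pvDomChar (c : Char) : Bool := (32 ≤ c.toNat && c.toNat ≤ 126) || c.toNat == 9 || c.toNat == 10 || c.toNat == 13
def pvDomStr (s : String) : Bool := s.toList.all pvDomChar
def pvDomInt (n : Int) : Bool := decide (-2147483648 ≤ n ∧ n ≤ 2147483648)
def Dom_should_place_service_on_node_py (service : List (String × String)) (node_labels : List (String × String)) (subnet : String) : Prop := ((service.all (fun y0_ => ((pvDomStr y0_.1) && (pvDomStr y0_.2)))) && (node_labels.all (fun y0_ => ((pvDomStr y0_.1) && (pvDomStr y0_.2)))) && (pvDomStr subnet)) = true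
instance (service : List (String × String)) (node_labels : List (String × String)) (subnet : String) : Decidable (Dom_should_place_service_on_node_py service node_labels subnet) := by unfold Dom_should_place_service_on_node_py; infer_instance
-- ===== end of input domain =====

-- B replaces A's per-keyword "kw in name" scans by the opposite traversal: it
-- enumerates the (length-capped) substrings of the service name, looks each up
-- in a keyword->priority hash map built once, and dispatches on the minimum
-- matched priority (objective: alternative; same results as A on all inputs).

-- ===== PORT A =====
def should_place_service_on_node_py (service : List (String × String)) (node_labels : List (String × String)) (subnet : String) : Bool :=
  let service_name := PySem.Str.lower ((PySem.Dict.mk service).getD "name" "")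
  let is_master := (PySem.Dict.mk node_labels).contains "node-role.kubernetes.io/master" ||
                   (PySem.Dict.mk node_labels).contains "node-role.kubernetes.io/control-plane"
  let master_services := ["api", "controller", "scheduler", "etcd", "coredns", "kube-proxy"]
  if master_services.any (fun term => PySem.Str.isIn term service_name) then is_master
  else
    let db_services := ["database", "mysql", "postgres", "postgresql", "mariadb", "mongodb",
                        "redis", "cassandra", "elasticsearch"]
    if db_services.any (fun term => PySem.Str.isIn term service_name) then
      PySem.Str.isIn "database" (PySem.Str.lower subnet) || PySem.Str.isIn "data" (PySem.Str.lower subnet)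
    else
      let frontend_services := ["nginx", "frontend", "web", "ui", "portal", "apache", "httpd"]
      if frontend_services.any (fun term => PySem.Str.isIn term service_name) then
        PySem.Str.isIn "frontend" (PySem.Str.lower subnet) || PySem.Str.isIn "dmz" (PySem.Str.lower subnet)
      else
        let backend_services := ["api", "backend", "service", "app", "application"]
        if backend_services.any (fun term => PySem.Str.isIn term service_name) then
          PySem.Str.isIn "backend" (PySem.Str.lower subnet) || PySem.Str.isIn "application" (PySem.Str.lower subnet)
        else
          !is_master

-- ===== PORT B =====
-- module-level _GROUPS
def pvGroups : List (List String) :=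
  [["api", "controller", "scheduler", "etcd", "coredns", "kube-proxy"],
   ["database", "mysql", "postgres", "postgresql", "mariadb", "mongodb",
    "redis", "cassandra", "elasticsearch"],
   ["nginx", "frontend", "web", "ui", "portal", "apache", "httpd"],
   ["api", "backend", "service", "app", "application"]]

-- module-level _KW2PRI: for pri, kws in enumerate(_GROUPS): for kw in kws: setdefault(kw, pri)
def pvKw2Pri : PySem.Dict String Int :=
  (PySem.List.enumerate pvGroups).foldl
    (fun d pr => pr.2.foldl (fun d kw => d.setdefault kw pr.1) d) PySem.Dict.empty

-- module-level _MAXKW = max(len(k) for k in _KW2PRI)  (nonempty literal dict, so max returns)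
def pvMaxKw : Int := (PySem.List.max? (pvKw2Pri.keys.map (fun k => PySem.Str.len k)) id).getD 0

-- _best_priority(name): min priority over keyword substrings of name, 4 = none
def pvBestPriority (name : String) : Int :=
  let n := PySem.Str.len name
  (PySem.List.pyRange 0 (n + 1) 1).foldl (fun best i =>
    (PySem.List.pyRange (i + 1) (min (i + pvMaxKw) n + 1) 1).foldl (fun best j =>
      match pvKw2Pri.get? (PySem.Str.slice name (some i) (some j)) with
      | some p => if p < best then p else best
      | none => best) best) 4

def should_place_service_on_node_py_alt (service : List (String × String)) (node_labels : List (String × String)) (subnet : String) : Bool :=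
  let name := PySem.Str.lower ((PySem.Dict.mk service).getD "name" "")
  let is_master := (PySem.Dict.mk node_labels).contains "node-role.kubernetes.io/master" ||
                   (PySem.Dict.mk node_labels).contains "node-role.kubernetes.io/control-plane"
  let best := pvBestPriority name
  let sub := PySem.Str.lower subnet
  if best == 0 then is_master
  else if best == 1 then PySem.Str.isIn "database" sub || PySem.Str.isIn "data" sub
  else if best == 2 then PySem.Str.isIn "frontend" sub || PySem.Str.isIn "dmz" sub
  else if best == 3 then PySem.Str.isIn "backend" sub || PySem.Str.isIn "application" sub
  else !is_master

-- ===== PRECONDITION & SPEC =====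
def Spec_should_place_service_on_node_py (service : List (String × String)) (node_labels : List (String × String)) (subnet : String) (out : Bool) : Prop := out = should_place_service_on_node_py_alt service node_labels subnet
instance (service : List (String × String)) (node_labels : List (String × String)) (subnet : String) (out : Bool) : Decidable (Spec_should_place_service_on_node_py service node_labels subnet out) := by unfold Spec_should_place_service_on_node_py; infer_instance

-- ===== CLAIM (what is proved, stated in full; the proofs are below) =====
def Claim_equal_should_place_service_on_node_py : Prop := ∀ (service : List (String × String)) (node_labels : List (String × String)) (subnet : String), Dom_should_place_service_on_node_py service node_labels subnet → Spec_should_place_service_on_node_py service node_labels subnet (should_place_service_on_node_py service node_labels subnet)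

-- ===== LEMMAS AND PROOFS =====

-- a foldl whose step is min-like w.r.t. a threshold p: the fold is ≤ p iff the
-- start is or some element's condition holds
theorem pv_foldl_le_iff {α : Type} (g : Int → α → Int) (C : α → Prop) (p : Int)
    (h : ∀ b x, g b x ≤ p ↔ b ≤ p ∨ C x) :
    ∀ (L : List α) (a : Int), L.foldl g a ≤ p ↔ a ≤ p ∨ ∃ x ∈ L, C x := by
  intro L
  induction L with
  | nil => intro a; simp
  | cons x t ih =>
      intro a
      rw [List.foldl_cons, ih, h]
      constructor
      · rintro ((hb | hc) | ⟨y, hy, hcy⟩)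
        · exact Or.inl hb
        · exact Or.inr ⟨x, List.mem_cons_self, hc⟩
        · exact Or.inr ⟨y, List.mem_cons_of_mem _ hy, hcy⟩
      · rintro (hb | ⟨y, hy, hcy⟩)
        · exact Or.inl (Or.inl hb)
        · rcases List.mem_cons.mp hy with rfl | hyt
          · exact Or.inl (Or.inr hcy)
          · exact Or.inr ⟨y, hyt, hcy⟩

-- inner condition: the substring name[i:j] is a keyword of priority ≤ p
def pvHit (name : String) (p i j : Int) : Prop :=
  ∃ q, pvKw2Pri.get? (PySem.Str.slice name (some i) (some j)) = some q ∧ q ≤ p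

theorem pv_inner_step (name : String) (p i : Int) : ∀ (b j : Int),
    (match pvKw2Pri.get? (PySem.Str.slice name (some i) (some j)) with
     | some q => if q < b then q else b
     | none => b) ≤ p ↔ b ≤ p ∨ pvHit name p i j := by
  intro b j
  unfold pvHit
  cases hq : pvKw2Pri.get? (PySem.Str.slice name (some i) (some j)) with
  | none => simp
  | some q =>
      simp only [Option.some.injEq]
      constructor
      · intro hle
        split_ifs at hle with hlt
        · exact Or.inr ⟨q, rfl, hle⟩
        · exact Or.inl hle
      · rintro (hb | ⟨q', rfl, hq'⟩) <;> split_ifs <;> omega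

-- best ≤ p  iff some (i, j) in the scanned ranges hits a keyword of priority ≤ p
theorem pvBestPriority_le_iff (name : String) (p : Int) :
    pvBestPriority name ≤ p ↔ 4 ≤ p ∨
      ∃ i ∈ PySem.List.pyRange 0 (PySem.Str.len name + 1) 1,
        ∃ j ∈ PySem.List.pyRange (i + 1) (min (i + pvMaxKw) (PySem.Str.len name) + 1) 1,
          pvHit name p i j := by
  unfold pvBestPriority
  exact pv_foldl_le_iff
    (fun best i =>
      (PySem.List.pyRange (i + 1) (min (i + pvMaxKw) (PySem.Str.len name) + 1) 1).foldl
        (fun best j =>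
          match pvKw2Pri.get? (PySem.Str.slice name (some i) (some j)) with
          | some p => if p < best then p else best
          | none => best) best)
    (fun i => ∃ j ∈ PySem.List.pyRange (i + 1) (min (i + pvMaxKw) (PySem.Str.len name) + 1) 1,
        pvHit name p i j)
    p
    (fun b i => pv_foldl_le_iff _ (pvHit name p i) p (pv_inner_step name p i) _ b)
    (PySem.List.pyRange 0 (PySem.Str.len name + 1) 1) 4

-- concrete facts about the literal dict/groups (proved by evaluation)
theorem pv_items_fact : ∀ pr ∈ pvKw2Pri.items,
    (0 ≤ pr.2 ∧ pr.2 < 4) ∧ pr.1 ∈ pvGroups.getD pr.2.toNat [] := by decide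

theorem pv_kw_len_fact : ∀ g ∈ pvGroups, ∀ kw ∈ g,
    1 ≤ kw.toList.length ∧ (kw.toList.length : Int) ≤ pvMaxKw := by decide

theorem pv_lookup_fact : ∀ k ∈ ([0, 1, 2, 3] : List Nat), ∀ kw ∈ pvGroups.getD k [],
    ((pvKw2Pri.get? kw).getD 9 ≤ (k : Int) ∧ (pvKw2Pri.get? kw).isSome = true) := by decide

-- best ≤ p (p < 4)  iff some group of index ≤ p has a keyword occurring in name
theorem pv_best_le_iff_groups (name : String) (p : Int) (hp4 : p < 4) :
    pvBestPriority name ≤ p ↔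
      ∃ k : Nat, (k : Int) ≤ p ∧
        (pvGroups.getD k []).any (fun t => PySem.Str.isIn t name) = true := by
  rw [pvBestPriority_le_iff]
  constructor
  · rintro (h4 | ⟨i, hi, j, hj, q, hget, hqp⟩)
    · omega
    · obtain ⟨hi0, _⟩ := (PySem.List.mem_pyRange_one).mp hi
      obtain ⟨hij, hjn⟩ := (PySem.List.mem_pyRange_one).mp hj
      obtain ⟨⟨hq0, _⟩, hmem⟩ :=
        pv_items_fact _ (PySem.Dict.mem_items_of_get?_eq_some _ hget)
      refine ⟨q.toNat, by omega, ?_⟩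
      rw [List.any_eq_true]
      refine ⟨PySem.Str.slice name (some i) (some j), hmem, ?_⟩
      -- the slice is an infix of name
      rw [PySem.Str.isIn_iff_infix, PySem.Str.toList_slice, PySem.Chars.slice_eq_listSlice]
      lift i to ℕ using hi0 with a
      lift j to ℕ using (by omega : (0:Int) ≤ j) with b
      rw [PySem.List.slice_natCast]
      exact (List.take_prefix _ _).isInfix.trans (List.drop_suffix _ _).isInfix
  · rintro ⟨k, hkp, hany⟩
    obtain ⟨kw, hkw, hin⟩ := List.any_eq_true.mp hany
    -- k ≤ 3, else getD gives [] and hkw is impossible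
    have hk3 : k ≤ 3 := by
      by_contra hk
      rw [List.getD_eq_default _ _ (by simp [pvGroups]; omega)] at hkw
      simp at hkw
    have hgmem : pvGroups.getD k [] ∈ pvGroups := by
      interval_cases k <;> simp [pvGroups]
    obtain ⟨hlen1, hlenM⟩ := pv_kw_len_fact _ hgmem _ hkw
    -- kw occurs in name at some position a
    rw [PySem.Str.isIn_eq] at hin
    obtain ⟨a, hpre⟩ := (PySem.Chars.exists_prefix_drop_iff_isIn _ _).mpr hin
    have hlendrop : kw.toList.length ≤ name.toList.length - a := by
      simpa using hpre.length_le
    have han : a < name.toList.length := by omega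
    right
    refine ⟨(a : Int), ?_, ((a : Int) + (kw.toList.length : Int)), ?_, ?_⟩
    · rw [PySem.List.mem_pyRange_one, PySem.Str.len_eq]; omega
    · rw [PySem.List.mem_pyRange_one, PySem.Str.len_eq]; omega
    · -- the slice at (a, a + len kw) is exactly kw
      have hslice : PySem.Str.slice name (some (a : Int))
          (some ((a : Int) + (kw.toList.length : Int))) = kw := by
        apply String.toList_inj.mp
        rw [PySem.Str.toList_slice, PySem.Chars.slice_eq_listSlice,
          PySem.List.slice_natCast_add]
        exact (List.prefix_iff_eq_take.mp hpre).symm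
      rw [pvHit, hslice]
      obtain ⟨hle9, hsome⟩ := pv_lookup_fact k (by interval_cases k <;> simp) kw hkw
      cases hq : pvKw2Pri.get? kw with
      | none => rw [hq] at hsome; simp at hsome
      | some q =>
          rw [hq] at hle9
          exact ⟨q, rfl, by simp at hle9; omega⟩

-- best never exceeds its start value 4
theorem pvBestPriority_le_four (name : String) : pvBestPriority name ≤ 4 := by
  rw [pvBestPriority_le_iff]; exact Or.inl le_rfl

-- best is nonnegative (all stored priorities are)
theorem pvBestPriority_nonneg (name : String) : ¬ pvBestPriority name ≤ -1 := by
  rw [pvBestPriority_le_iff]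
  rintro (h | ⟨i, _, j, _, q, hget, hq⟩)
  · omega
  · have := (pv_items_fact _ (PySem.Dict.mem_items_of_get?_eq_some _ hget)).1
    omega

-- the core case analysis, with the shared subexpressions generalized
theorem pv_main (name sub : String) (im : Bool) :
    (if (["api", "controller", "scheduler", "etcd", "coredns", "kube-proxy"].any
          (fun term => PySem.Str.isIn term name)) then im
     else if (["database", "mysql", "postgres", "postgresql", "mariadb", "mongodb",
               "redis", "cassandra", "elasticsearch"].any
          (fun term => PySem.Str.isIn term name)) then
       PySem.Str.isIn "database" sub || PySem.Str.isIn "data" sub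
     else if (["nginx", "frontend", "web", "ui", "portal", "apache", "httpd"].any
          (fun term => PySem.Str.isIn term name)) then
       PySem.Str.isIn "frontend" sub || PySem.Str.isIn "dmz" sub
     else if (["api", "backend", "service", "app", "application"].any
          (fun term => PySem.Str.isIn term name)) then
       PySem.Str.isIn "backend" sub || PySem.Str.isIn "application" sub
     else !im) =
    (let best := pvBestPriority name
     if best == 0 then im
     else if best == 1 then PySem.Str.isIn "database" sub || PySem.Str.isIn "data" sub
     else if best == 2 then PySem.Str.isIn "frontend" sub || PySem.Str.isIn "dmz" sub
     else if best == 3 then PySem.Str.isIn "backend" sub || PySem.Str.isIn "application" sub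
     else !im) := by
  set m0 := (["api", "controller", "scheduler", "etcd", "coredns", "kube-proxy"].any
    (fun term => PySem.Str.isIn term name)) with hm0
  set m1 := (["database", "mysql", "postgres", "postgresql", "mariadb", "mongodb",
    "redis", "cassandra", "elasticsearch"].any (fun term => PySem.Str.isIn term name)) with hm1
  set m2 := (["nginx", "frontend", "web", "ui", "portal", "apache", "httpd"].any
    (fun term => PySem.Str.isIn term name)) with hm2
  set m3 := (["api", "backend", "service", "app", "application"].any
    (fun term => PySem.Str.isIn term name)) with hm3
  have hg0 : (pvGroups.getD 0 []).any (fun t => PySem.Str.isIn t name) = m0 := by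
    rw [hm0]; rfl
  have hg1 : (pvGroups.getD 1 []).any (fun t => PySem.Str.isIn t name) = m1 := by
    rw [hm1]; rfl
  have hg2 : (pvGroups.getD 2 []).any (fun t => PySem.Str.isIn t name) = m2 := by
    rw [hm2]; rfl
  have hg3 : (pvGroups.getD 3 []).any (fun t => PySem.Str.isIn t name) = m3 := by
    rw [hm3]; rfl
  have h0 : pvBestPriority name ≤ 0 ↔ m0 = true := by
    rw [pv_best_le_iff_groups name 0 (by omega)]
    constructor
    · rintro ⟨k, hk, h⟩
      have : k = 0 := by omega
      subst this; rwa [hg0] at h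
    · intro h; exact ⟨0, by omega, by rwa [hg0]⟩
  have h1 : pvBestPriority name ≤ 1 ↔ (m0 = true ∨ m1 = true) := by
    rw [pv_best_le_iff_groups name 1 (by omega)]
    constructor
    · rintro ⟨k, hk, h⟩
      have hk1 : k ≤ 1 := by omega
      interval_cases k
      · left; rwa [hg0] at h
      · right; rwa [hg1] at h
    · rintro (h | h)
      · exact ⟨0, by omega, by rwa [hg0]⟩
      · exact ⟨1, by omega, by rwa [hg1]⟩
  have h2 : pvBestPriority name ≤ 2 ↔ (m0 = true ∨ m1 = true ∨ m2 = true) := by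
    rw [pv_best_le_iff_groups name 2 (by omega)]
    constructor
    · rintro ⟨k, hk, h⟩
      have hk2 : k ≤ 2 := by omega
      interval_cases k
      · exact Or.inl (by rwa [hg0] at h)
      · exact Or.inr (Or.inl (by rwa [hg1] at h))
      · exact Or.inr (Or.inr (by rwa [hg2] at h))
    · rintro (h | h | h)
      · exact ⟨0, by omega, by rwa [hg0]⟩
      · exact ⟨1, by omega, by rwa [hg1]⟩
      · exact ⟨2, by omega, by rwa [hg2]⟩
  have h3 : pvBestPriority name ≤ 3 ↔ (m0 = true ∨ m1 = true ∨ m2 = true ∨ m3 = true) := by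
    rw [pv_best_le_iff_groups name 3 (by omega)]
    constructor
    · rintro ⟨k, hk, h⟩
      have hk3 : k ≤ 3 := by omega
      interval_cases k
      · exact Or.inl (by rwa [hg0] at h)
      · exact Or.inr (Or.inl (by rwa [hg1] at h))
      · exact Or.inr (Or.inr (Or.inl (by rwa [hg2] at h)))
      · exact Or.inr (Or.inr (Or.inr (by rwa [hg3] at h)))
    · rintro (h | h | h | h)
      · exact ⟨0, by omega, by rwa [hg0]⟩
      · exact ⟨1, by omega, by rwa [hg1]⟩
      · exact ⟨2, by omega, by rwa [hg2]⟩
      · exact ⟨3, by omega, by rwa [hg3]⟩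
  have h4 := pvBestPriority_le_four name
  have hneg := pvBestPriority_nonneg name
  by_cases e0 : m0 = true
  · have hb : pvBestPriority name = 0 := by
      have := h0.mpr e0; omega
    simp [hb, e0]
  · by_cases e1 : m1 = true
    · have hb : pvBestPriority name = 1 := by
        have hle := h1.mpr (Or.inr e1)
        have hnot : ¬ pvBestPriority name ≤ 0 := fun hc => e0 (h0.mp hc)
        omega
      simp [hb, e0, e1]
    · by_cases e2 : m2 = true
      · have hb : pvBestPriority name = 2 := by
          have hle := h2.mpr (Or.inr (Or.inr e2))
          have hnot : ¬ pvBestPriority name ≤ 1 := fun hc => by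
            rcases h1.mp hc with h | h
            · exact e0 h
            · exact e1 h
          omega
        simp [hb, e0, e1, e2]
      · by_cases e3 : m3 = true
        · have hb : pvBestPriority name = 3 := by
            have hle := h3.mpr (Or.inr (Or.inr (Or.inr e3)))
            have hnot : ¬ pvBestPriority name ≤ 2 := fun hc => by
              rcases h2.mp hc with h | h | h
              · exact e0 h
              · exact e1 h
              · exact e2 h
            omega
          simp [hb, e0, e1, e2, e3]
        · have hb : pvBestPriority name = 4 := by
            have hnot : ¬ pvBestPriority name ≤ 3 := fun hc => by
              rcases h3.mp hc with h | h | h | h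
              · exact e0 h
              · exact e1 h
              · exact e2 h
              · exact e3 h
            omega
          simp [hb, e0, e1, e2, e3]

-- ===== VERDICT (by name: the statement is the Claim_ definition above) =====
theorem should_place_service_on_node_py_spec : Claim_equal_should_place_service_on_node_py := by
  intro service node_labels subnet _
  unfold Spec_should_place_service_on_node_py
  unfold should_place_service_on_node_py should_place_service_on_node_py_alt
  exact pv_main _ _ _
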